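-- pv_equiv track=rewrite | github.com/JefferyLiu6/Kairo | backend/assistant/personal_manager/presentation/formatters.py | _format_schedule_remove_summary
-- ===== SOURCE A (Python) =====
-- def _norm(text: str) -> str:
--     return " ".join(text.lower().strip().split())
--
-- def _format_schedule_remove_summary(titles: list[str]) -> str:
--     if not titles:
--         return "Remove schedule event"
--     unique_titles = []
--     seen = set()
--     for title in titles:
--         clean = str(title or "Untitled").strip() or "Untitled"
--         key = _norm(clean)
--         if key in seen:
--             continue
--         seen.add(key)
--         unique_titles.append(clean)
--     if len(titles) == 1:
--         return f"Remove schedule event: {unique_titles[0]}"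
--     if len(unique_titles) == 1:
--         return f"Remove {len(titles)} schedule events: {unique_titles[0]}"
--     return f"Remove {len(titles)} schedule events"
-- ===== SOURCE B (Python) =====
-- def _norm(text: str) -> str:
--     return " ".join(text.lower().strip().split())
--
-- def _format_schedule_remove_summary(titles: list[str]) -> str:
--     if not titles:
--         return "Remove schedule event"
--     first_clean = str(titles[0] or "Untitled").strip() or "Untitled"
--     if len(titles) == 1:
--         return f"Remove schedule event: {first_clean}"
--     first_key = _norm(first_clean)
--     if all(_norm(str(t or "Untitled").strip() or "Untitled") == first_key for t in titles[1:]):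
--         return f"Remove {len(titles)} schedule events: {first_clean}"
--     return f"Remove {len(titles)} schedule events"
-- ===== Notes on version B (the rewrite author's own statement) =====
-- stated objective: simpler
-- what changed: Replaces A's seen-set plus ordered dedup-list accumulator with no collection at all: B compares every remaining title's normalized key to the first title's key with a short-circuiting all(), since A's dedup list has length 1 exactly when all keys equal the first.
import Mathlib
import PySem

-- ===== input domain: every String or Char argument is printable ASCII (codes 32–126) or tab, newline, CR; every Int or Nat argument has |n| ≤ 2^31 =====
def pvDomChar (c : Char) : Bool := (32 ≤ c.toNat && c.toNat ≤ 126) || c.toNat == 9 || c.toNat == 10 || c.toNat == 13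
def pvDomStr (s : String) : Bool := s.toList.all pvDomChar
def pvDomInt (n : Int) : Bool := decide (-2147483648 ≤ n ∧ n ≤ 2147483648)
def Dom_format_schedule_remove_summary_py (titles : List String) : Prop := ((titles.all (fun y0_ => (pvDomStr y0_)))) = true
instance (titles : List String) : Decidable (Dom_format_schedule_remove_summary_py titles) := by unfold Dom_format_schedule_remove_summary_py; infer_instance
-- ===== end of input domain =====

-- B drops A's seen-set and ordered dedup-list entirely: it compares every remaining
-- title's normalized key to the first title's key (objective: simpler).


-- ===== PORT A =====
-- _norm(text) = " ".join(text.lower().strip().split())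
def pvNorm (text : String) : String :=
  PySem.Str.join " " (PySem.Str.split₀ (PySem.Str.strip (PySem.Str.lower text)))

-- clean = str(title or "Untitled").strip() or "Untitled"
def pvClean (title : String) : String :=
  let t := if title = "" then "Untitled" else title
  let st := PySem.Str.strip t
  if st = "" then "Untitled" else st

-- the body of A's for-loop over (unique_titles, seen)
def pvStep (st : List String × PySem.Set String) (title : String) :
    List String × PySem.Set String :=
  let clean := pvClean title
  let key := pvNorm clean
  if PySem.Set.contains st.2 key then st
  else (st.1 ++ [clean], PySem.Set.add st.2 key)

def format_schedule_remove_summary_py (titles : List String) : String :=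
  if titles = [] then "Remove schedule event"
  else
    let r := titles.foldl pvStep ([], PySem.Set.empty)
    let uniq := r.1
    -- unique_titles[0]: uniq is nonempty whenever titles is, so the default is never used
    if titles.length = 1 then
      "Remove schedule event: " ++ PySem.List.pyGetD uniq 0 ""
    else if uniq.length = 1 then
      "Remove " ++ PySem.Int.toStr titles.length ++ " schedule events: " ++ PySem.List.pyGetD uniq 0 ""
    else
      "Remove " ++ PySem.Int.toStr titles.length ++ " schedule events"

-- ===== PORT B =====
-- key of a title: _norm(str(t or "Untitled").strip() or "Untitled")
def pvKeyB (t : String) : String := pvNorm (pvClean t)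

def format_schedule_remove_summary_py_alt (titles : List String) : String :=
  match titles with
  | [] => "Remove schedule event"
  | first :: rest =>
    let firstClean := pvClean first
    if titles.length = 1 then
      "Remove schedule event: " ++ firstClean
    else
      let firstKey := pvNorm firstClean
      -- all(... == first_key for t in titles[1:])
      if rest.all (fun t => pvKeyB t == firstKey) then
        "Remove " ++ PySem.Int.toStr titles.length ++ " schedule events: " ++ firstClean
      else
        "Remove " ++ PySem.Int.toStr titles.length ++ " schedule events"

-- ===== PRECONDITION & SPEC =====
def Spec_format_schedule_remove_summary_py (titles : List String) (out : String) : Prop := out = format_schedule_remove_summary_py_alt titles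
instance (titles : List String) (out : String) : Decidable (Spec_format_schedule_remove_summary_py titles out) := by unfold Spec_format_schedule_remove_summary_py; infer_instance

-- ===== CLAIM (what is proved, stated in full; the proofs are below) =====
def Claim_equal_format_schedule_remove_summary_py : Prop := ∀ (titles : List String), Dom_format_schedule_remove_summary_py titles → Spec_format_schedule_remove_summary_py titles (format_schedule_remove_summary_py titles)

-- ===== LEMMAS AND PROOFS =====

-- unfolding one iteration of A's loop body, by the seen-membership test
theorem pvStep_pos (uniq : List String) (seen : PySem.Set String) (t : String)
    (h : PySem.Set.contains seen (pvKeyB t) = true) :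
    pvStep (uniq, seen) t = (uniq, seen) := by
  simp [pvStep, pvKeyB] at h ⊢; simp [h]

theorem pvStep_neg (uniq : List String) (seen : PySem.Set String) (t : String)
    (h : PySem.Set.contains seen (pvKeyB t) = false) :
    pvStep (uniq, seen) t = (uniq ++ [pvClean t], seen ++ [pvKeyB t]) := by
  simp [pvStep, pvKeyB, PySem.Set.add] at h ⊢; simp [h]

-- the fold only appends to unique_titles
theorem pvStep_prefix (l : List String) (uniq : List String) (seen : PySem.Set String) :
    ∃ tl, (l.foldl pvStep (uniq, seen)).1 = uniq ++ tl := by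
  induction l generalizing uniq seen with
  | nil => exact ⟨[], (List.append_nil uniq).symm⟩
  | cons t l ih =>
    simp only [List.foldl_cons]
    cases h : PySem.Set.contains seen (pvKeyB t) with
    | true => rw [pvStep_pos _ _ _ h]; exact ih uniq seen
    | false =>
      rw [pvStep_neg _ _ _ h]
      obtain ⟨tl, htl⟩ := ih (uniq ++ [pvClean t]) (seen ++ [pvKeyB t])
      exact ⟨pvClean t :: tl, by simpa using htl⟩

-- unique_titles stays at its starting length iff every key was already seen
theorem pvStep_len_iff (l : List String) (uniq : List String) (seen : PySem.Set String) :
    ((l.foldl pvStep (uniq, seen)).1.length = uniq.length)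
      ↔ (l.all (fun t => PySem.Set.contains seen (pvKeyB t)) = true) := by
  induction l generalizing uniq seen with
  | nil => simp
  | cons t l ih =>
    simp only [List.foldl_cons, List.all_cons, Bool.and_eq_true]
    cases h : PySem.Set.contains seen (pvKeyB t) with
    | true =>
      rw [pvStep_pos _ _ _ h]
      simp [ih uniq seen]
    | false =>
      rw [pvStep_neg _ _ _ h]
      simp only [Bool.false_eq_true, false_and, iff_false]
      obtain ⟨tl, htl⟩ := pvStep_prefix l (uniq ++ [pvClean t]) (seen ++ [pvKeyB t])
      rw [htl]
      simp only [List.length_append, List.length_cons]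
      omega

-- ===== VERDICT (by name: the statement is the Claim_ definition above) =====
theorem format_schedule_remove_summary_py_spec : Claim_equal_format_schedule_remove_summary_py := by
  intro titles _
  unfold Spec_format_schedule_remove_summary_py
  match titles with
  | [] => rfl
  | t :: rest =>
    unfold format_schedule_remove_summary_py format_schedule_remove_summary_py_alt
    have hstep : pvStep ([], PySem.Set.empty) t = ([pvClean t], [pvKeyB t]) := by
      simp [pvStep, pvKeyB, PySem.Set.empty, PySem.Set.contains, PySem.Set.add]
    simp only [List.foldl_cons, hstep]
    obtain ⟨tl, htl⟩ := pvStep_prefix rest [pvClean t] [pvKeyB t]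
    have hget : PySem.List.pyGetD (rest.foldl pvStep ([pvClean t], [pvKeyB t])).1 0 "" = pvClean t := by
      rw [htl]
      simp [PySem.List.pyGetD, PySem.List.pyGet?, PySem.List.pyIdx?]
    have hlen : ((rest.foldl pvStep ([pvClean t], [pvKeyB t])).1.length = 1)
        ↔ (rest.all (fun s => pvKeyB s == pvNorm (pvClean t)) = true) := by
      rw [show (1 : ℕ) = ([pvClean t] : List String).length from rfl,
        pvStep_len_iff]
      constructor <;> intro h <;> refine List.all_eq_true.2 fun s hs => ?_ <;>
        have hh := List.all_eq_true.1 h s hs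
      · have : pvKeyB s ∈ ([pvKeyB t] : List String) := by
          simpa [PySem.Set.contains] using hh
        simp only [List.mem_singleton] at this
        simpa [pvKeyB] using this
      · have : pvKeyB s = pvKeyB t := by simpa [pvKeyB] using hh
        simp [PySem.Set.contains, this]
    by_cases hrest : rest = []
    · subst hrest
      simp only [List.foldl_nil] at hget
      simp [hget]
    · by_cases h2 : (rest.foldl pvStep ([pvClean t], [pvKeyB t])).1.length = 1
      · simp [hrest, h2, hget, hlen.1 h2]
      · have hb : ¬ (rest.all (fun s => pvKeyB s == pvNorm (pvClean t)) = true) :=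
          fun hb => h2 (hlen.2 hb)
        simp [hrest, h2, hb]
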